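-- pv_equiv track=rewrite | github.com/ventaquil/des-attack | des/__init__.py | cast_8_bit_to_6_bit
-- ===== SOURCE A (Python) =====
-- def cast_8_bit_to_6_bit(bytes):
--     # TODO validate bytes
--
--     values = []
--     for index in range(len(bytes) * 8 // 6):
--         value = 0
--         byte_index = (index * 6) // 8
--         if (index % 4) == 0:
--             value = (bytes[byte_index] & 0xFC) >> 2
--         elif (index % 4) == 1:
--             value = (bytes[byte_index] & 0x03) << 4
--             value |= (bytes[byte_index + 1] & 0xF0) >> 4
--         elif (index % 4) == 2:
--             value = (bytes[byte_index] & 0x0F) << 2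
--             value |= (bytes[byte_index + 1] & 0xC0) >> 6
--         elif (index % 4) == 3:
--             value = bytes[byte_index] & 0x3F
--         values.append(value)
--     return values
-- ===== SOURCE B (Python) =====
-- def cast_8_bit_to_6_bit(bytes):
--     # One pass over the input as an MSB-first bitstream: shift each byte into an
--     # accumulator and emit a 6-bit value whenever at least 6 bits are buffered.
--     values = []
--     acc = 0
--     nbits = 0
--     for byte in bytes:
--         acc = (acc << 8) | (byte & 0xFF)
--         nbits += 8
--         while nbits >= 6:
--             nbits -= 6
--             values.append((acc >> nbits) & 0x3F)
--             acc &= (1 << nbits) - 1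
--     return values
-- ===== Notes on version B (the rewrite author's own statement) =====
-- stated objective: alternative
-- what changed: Replaces A's index%4 case analysis with computed byte offsets by a single MSB-first bit-accumulator pass: each byte is shifted into an accumulator and a 6-bit value is emitted whenever at least 6 bits are buffered.
import Mathlib
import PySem

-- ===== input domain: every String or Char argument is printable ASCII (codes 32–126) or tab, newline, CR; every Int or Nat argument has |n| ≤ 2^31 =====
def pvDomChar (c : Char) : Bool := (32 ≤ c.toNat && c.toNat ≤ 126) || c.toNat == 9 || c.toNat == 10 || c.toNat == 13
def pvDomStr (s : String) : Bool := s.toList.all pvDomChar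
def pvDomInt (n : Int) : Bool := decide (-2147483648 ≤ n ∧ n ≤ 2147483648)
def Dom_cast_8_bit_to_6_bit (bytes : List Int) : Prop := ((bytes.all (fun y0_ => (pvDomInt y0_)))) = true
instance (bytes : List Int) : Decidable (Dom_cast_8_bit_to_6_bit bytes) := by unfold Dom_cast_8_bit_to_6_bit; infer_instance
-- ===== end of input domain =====

-- B repacks the bytes through a single MSB-first bit accumulator (shift in 8 bits, emit 6-bit
-- values while at least 6 are buffered) instead of A's `index % 4` case analysis with computed
-- byte indices; same return value on every input (objective: alternative decomposition).

-- ===== PORT A =====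
-- the per-iteration value A appends inside its loop, kept as a named helper;
-- bytes[byte_index] (and byte_index+1 where used) is always in range because
-- index < len(bytes)*8//6, so the total pyGetD with default 0 is exact here.
def pvAvalue (bytes : List Int) (index : Int) : Int :=
  let byte_index := PySem.Int.floordiv (index * 6) 8
  if PySem.Int.mod index 4 = 0 then
    (PySem.Int.band (PySem.List.pyGetD bytes byte_index 0) 252) >>> (2 : Nat)
  else if PySem.Int.mod index 4 = 1 then
    PySem.Int.bor ((PySem.Int.band (PySem.List.pyGetD bytes byte_index 0) 3) <<< (4 : Nat))
      ((PySem.Int.band (PySem.List.pyGetD bytes (byte_index + 1) 0) 240) >>> (4 : Nat))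
  else if PySem.Int.mod index 4 = 2 then
    PySem.Int.bor ((PySem.Int.band (PySem.List.pyGetD bytes byte_index 0) 15) <<< (2 : Nat))
      ((PySem.Int.band (PySem.List.pyGetD bytes (byte_index + 1) 0) 192) >>> (6 : Nat))
  else if PySem.Int.mod index 4 = 3 then
    PySem.Int.band (PySem.List.pyGetD bytes byte_index 0) 63
  else 0

def cast_8_bit_to_6_bit (bytes : List Int) : List Int :=
  (PySem.List.pyRange 0 (PySem.Int.floordiv ((bytes.length : Int) * 8) 6) 1).foldl
    (fun values index => values ++ [pvAvalue bytes index]) []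

-- ===== PORT B =====
-- the inner `while nbits >= 6` loop of B
def pvEmit (values : List Int) (acc : Int) (nbits : Nat) : List Int × Int × Nat :=
  if h : 6 ≤ nbits then
    pvEmit (values ++ [PySem.Int.band (acc >>> (nbits - 6)) 63])
      (PySem.Int.band acc ((1 <<< (nbits - 6)) - 1)) (nbits - 6)
  else (values, acc, nbits)
termination_by nbits
decreasing_by omega

-- the body of B's `for byte in bytes` loop
def pvStep (st : List Int × Int × Nat) (byte : Int) : List Int × Int × Nat :=
  pvEmit st.1 (PySem.Int.bor (st.2.1 <<< (8 : Nat)) (PySem.Int.band byte 255)) (st.2.2 + 8)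

def cast_8_bit_to_6_bit_alt (bytes : List Int) : List Int :=
  (bytes.foldl pvStep ([], 0, 0)).1

-- ===== PRECONDITION & SPEC =====
def Spec_cast_8_bit_to_6_bit (bytes : List Int) (out : List Int) : Prop := out = cast_8_bit_to_6_bit_alt bytes
instance (bytes : List Int) (out : List Int) : Decidable (Spec_cast_8_bit_to_6_bit bytes out) := by unfold Spec_cast_8_bit_to_6_bit; infer_instance

-- ===== CLAIM (what is proved, stated in full; the proofs are below) =====
def Claim_equal_cast_8_bit_to_6_bit : Prop := ∀ (bytes : List Int), Dom_cast_8_bit_to_6_bit bytes → Spec_cast_8_bit_to_6_bit bytes (cast_8_bit_to_6_bit bytes)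

-- ===== LEMMAS AND PROOFS =====

lemma pvNatMask (n j m : Nat) : n &&& ((2 ^ m - 1) <<< j) = ((n / 2 ^ j) % 2 ^ m) * 2 ^ j := by
  have h : n &&& ((2 ^ m - 1) <<< j) = ((n >>> j) &&& (2 ^ m - 1)) <<< j := by
    apply Nat.eq_of_testBit_eq
    intro i
    simp only [Nat.testBit_and, Nat.testBit_shiftLeft, Nat.testBit_shiftRight,
      Nat.testBit_two_pow_sub_one]
    by_cases hij : j ≤ i
    · have : j + (i - j) = i := by omega
      simp [ge_iff_le, hij, this, Bool.and_comm]
    · simp [ge_iff_le, hij]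
  rw [h, Nat.shiftRight_eq_div_pow, Nat.and_two_pow_sub_one_eq_mod, Nat.shiftLeft_eq]

lemma pvBand3 (a : Int) : PySem.Int.band a 3 = a % 4 := by
  unfold PySem.Int.band
  split_ifs with h1 h2 h2
  · obtain ⟨n, rfl⟩ := Int.eq_ofNat_of_zero_le h1
    have key : n &&& 3 = n / 1 % 4 * 1 := by simpa [Nat.shiftLeft_eq] using pvNatMask n 0 2
    simp only [Int.toNat_natCast, show ((3:Int)).toNat = 3 from rfl, key]; omega
  · norm_num at h2
  · have key : (-a-1).toNat &&& 3 = (-a-1).toNat / 1 % 4 * 1 := by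
      simpa [Nat.shiftLeft_eq] using pvNatMask (-a-1).toNat 0 2
    simp only [show ((3:Int)).toNat = 3 from rfl, Nat.land_comm 3, key]; omega
  · norm_num at h2

lemma pvBand15 (a : Int) : PySem.Int.band a 15 = a % 16 := by
  unfold PySem.Int.band
  split_ifs with h1 h2 h2
  · obtain ⟨n, rfl⟩ := Int.eq_ofNat_of_zero_le h1
    have key : n &&& 15 = n / 1 % 16 * 1 := by simpa [Nat.shiftLeft_eq] using pvNatMask n 0 4
    simp only [Int.toNat_natCast, show ((15:Int)).toNat = 15 from rfl, key]; omega
  · norm_num at h2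
  · have key : (-a-1).toNat &&& 15 = (-a-1).toNat / 1 % 16 * 1 := by
      simpa [Nat.shiftLeft_eq] using pvNatMask (-a-1).toNat 0 4
    simp only [show ((15:Int)).toNat = 15 from rfl, Nat.land_comm 15, key]; omega
  · norm_num at h2

lemma pvBand63 (a : Int) : PySem.Int.band a 63 = a % 64 := by
  unfold PySem.Int.band
  split_ifs with h1 h2 h2
  · obtain ⟨n, rfl⟩ := Int.eq_ofNat_of_zero_le h1
    have key : n &&& 63 = n / 1 % 64 * 1 := by simpa [Nat.shiftLeft_eq] using pvNatMask n 0 6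
    simp only [Int.toNat_natCast, show ((63:Int)).toNat = 63 from rfl, key]; omega
  · norm_num at h2
  · have key : (-a-1).toNat &&& 63 = (-a-1).toNat / 1 % 64 * 1 := by
      simpa [Nat.shiftLeft_eq] using pvNatMask (-a-1).toNat 0 6
    simp only [show ((63:Int)).toNat = 63 from rfl, Nat.land_comm 63, key]; omega
  · norm_num at h2

lemma pvBand255 (a : Int) : PySem.Int.band a 255 = a % 256 := by
  unfold PySem.Int.band
  split_ifs with h1 h2 h2
  · obtain ⟨n, rfl⟩ := Int.eq_ofNat_of_zero_le h1
    have key : n &&& 255 = n / 1 % 256 * 1 := by simpa [Nat.shiftLeft_eq] using pvNatMask n 0 8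
    simp only [Int.toNat_natCast, show ((255:Int)).toNat = 255 from rfl, key]; omega
  · norm_num at h2
  · have key : (-a-1).toNat &&& 255 = (-a-1).toNat / 1 % 256 * 1 := by
      simpa [Nat.shiftLeft_eq] using pvNatMask (-a-1).toNat 0 8
    simp only [show ((255:Int)).toNat = 255 from rfl, Nat.land_comm 255, key]; omega
  · norm_num at h2

lemma pvBand252 (a : Int) : PySem.Int.band a 252 = a % 256 - a % 4 := by
  unfold PySem.Int.band
  split_ifs with h1 h2 h2
  · obtain ⟨n, rfl⟩ := Int.eq_ofNat_of_zero_le h1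
    have key : n &&& 252 = n / 4 % 64 * 4 := by simpa [Nat.shiftLeft_eq] using pvNatMask n 2 6
    simp only [Int.toNat_natCast, show ((252:Int)).toNat = 252 from rfl, key]; omega
  · norm_num at h2
  · have key : (-a-1).toNat &&& 252 = (-a-1).toNat / 4 % 64 * 4 := by
      simpa [Nat.shiftLeft_eq] using pvNatMask (-a-1).toNat 2 6
    simp only [show ((252:Int)).toNat = 252 from rfl, Nat.land_comm 252, key]; omega
  · norm_num at h2

lemma pvBand240 (a : Int) : PySem.Int.band a 240 = a % 256 - a % 16 := by
  unfold PySem.Int.band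
  split_ifs with h1 h2 h2
  · obtain ⟨n, rfl⟩ := Int.eq_ofNat_of_zero_le h1
    have key : n &&& 240 = n / 16 % 16 * 16 := by simpa [Nat.shiftLeft_eq] using pvNatMask n 4 4
    simp only [Int.toNat_natCast, show ((240:Int)).toNat = 240 from rfl, key]; omega
  · norm_num at h2
  · have key : (-a-1).toNat &&& 240 = (-a-1).toNat / 16 % 16 * 16 := by
      simpa [Nat.shiftLeft_eq] using pvNatMask (-a-1).toNat 4 4
    simp only [show ((240:Int)).toNat = 240 from rfl, Nat.land_comm 240, key]; omega
  · norm_num at h2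

lemma pvBand192 (a : Int) : PySem.Int.band a 192 = a % 256 - a % 64 := by
  unfold PySem.Int.band
  split_ifs with h1 h2 h2
  · obtain ⟨n, rfl⟩ := Int.eq_ofNat_of_zero_le h1
    have key : n &&& 192 = n / 64 % 4 * 64 := by simpa [Nat.shiftLeft_eq] using pvNatMask n 6 2
    simp only [Int.toNat_natCast, show ((192:Int)).toNat = 192 from rfl, key]; omega
  · norm_num at h2
  · have key : (-a-1).toNat &&& 192 = (-a-1).toNat / 64 % 4 * 64 := by
      simpa [Nat.shiftLeft_eq] using pvNatMask (-a-1).toNat 6 2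
    simp only [show ((192:Int)).toNat = 192 from rfl, Nat.land_comm 192, key]; omega
  · norm_num at h2

lemma pvBorPow (k : Nat) (m y : Int) (hm : 0 ≤ m) (hy : 0 ≤ y) (h : y < 2 ^ k) :
    PySem.Int.bor (m * 2 ^ k) y = m * 2 ^ k + y := by
  obtain ⟨n, rfl⟩ := Int.eq_ofNat_of_zero_le hm
  obtain ⟨z, rfl⟩ := Int.eq_ofNat_of_zero_le hy
  have hz : z < 2 ^ k := by exact_mod_cast h
  have : ((n : Int)) * 2 ^ k = ((n * 2 ^ k : Nat) : Int) := by push_cast; ring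
  rw [this, PySem.Int.bor_natCast]
  rw [show n * 2 ^ k ||| z = 2 ^ k * n ||| z from by ring_nf]
  rw [← Nat.two_pow_add_eq_or_of_lt hz]
  push_cast; ring

def pvE0 (a : Int) : Int := (a % 256 - a % 4) / 4
def pvE1 (a b : Int) : Int := (a % 4) * 16 + (b % 256 - b % 16) / 16
def pvE2 (b c : Int) : Int := (b % 16) * 4 + (c % 256 - c % 64) / 64
def pvE3 (c : Int) : Int := c % 64

lemma pvA0 (a : Int) : (PySem.Int.band a 252) >>> (2 : Nat) = pvE0 a := by
  rw [pvBand252, Int.shiftRight_eq_div_pow, pvE0]; norm_num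

lemma pvA1 (a b : Int) :
    PySem.Int.bor ((PySem.Int.band a 3) <<< (4 : Nat)) ((PySem.Int.band b 240) >>> (4 : Nat)) = pvE1 a b := by
  rw [pvBand3, pvBand240, Int.shiftLeft_eq, Int.shiftRight_eq_div_pow]
  rw [pvBorPow 4 _ _ (by omega) (by omega) (by norm_num; omega)]
  rw [pvE1]; norm_num

lemma pvA2 (b c : Int) :
    PySem.Int.bor ((PySem.Int.band b 15) <<< (2 : Nat)) ((PySem.Int.band c 192) >>> (6 : Nat)) = pvE2 b c := by
  rw [pvBand15, pvBand192, Int.shiftLeft_eq, Int.shiftRight_eq_div_pow]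
  rw [pvBorPow 2 _ _ (by omega) (by omega) (by norm_num; omega)]
  rw [pvE2]; norm_num

lemma pvA3 (c : Int) : PySem.Int.band c 63 = pvE3 c := by
  rw [pvBand63, pvE3]

lemma pvStep1 (vals : List Int) (a : Int) :
    pvStep (vals, 0, 0) a = (vals ++ [pvE0 a], a % 4, 2) := by
  rw [pvStep]
  simp only
  rw [show ((0:Int) <<< (8:Nat)) = 0 from by rw [Int.shiftLeft_eq]; ring,
      PySem.Int.bor_comm, PySem.Int.bor_zero, pvBand255]
  rw [pvEmit]
  norm_num
  rw [pvEmit]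
  norm_num
  refine ⟨?_, ?_⟩
  · rw [Int.shiftRight_eq_div_pow, pvBand63, pvE0]; norm_num; omega
  · rw [show ((1:Int) <<< (2:Nat)) - 1 = 3 from by rw [Int.shiftLeft_eq]; ring, pvBand3]
    omega

lemma pvStep2 (vals : List Int) (q b : Int) (hq0 : 0 ≤ q) (hq : q < 4) :
    pvStep (vals, q, 2) b = (vals ++ [q * 16 + (b % 256 - b % 16) / 16], b % 16, 4) := by
  rw [pvStep]
  simp only
  rw [Int.shiftLeft_eq, pvBand255,
      pvBorPow 8 _ _ hq0 (by omega) (by norm_num; omega)]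
  rw [pvEmit]
  norm_num
  rw [pvEmit]
  norm_num
  refine ⟨?_, ?_⟩
  · rw [Int.shiftRight_eq_div_pow, pvBand63]; norm_num; omega
  · rw [show ((1:Int) <<< (4:Nat)) - 1 = 15 from by rw [Int.shiftLeft_eq]; ring, pvBand15]
    omega


lemma pvStep3 (vals : List Int) (r c : Int) (hr0 : 0 ≤ r) (hr : r < 16) :
    pvStep (vals, r, 4) c = (vals ++ [r * 4 + (c % 256 - c % 64) / 64, pvE3 c], 0, 0) := by
  rw [pvStep]
  simp only
  rw [Int.shiftLeft_eq, pvBand255,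
      pvBorPow 8 _ _ hr0 (by omega) (by norm_num; omega)]
  rw [pvEmit]
  norm_num
  rw [pvEmit]
  norm_num
  rw [pvEmit]
  norm_num
  refine ⟨?_, ?_⟩
  · rw [Int.shiftRight_eq_div_pow, pvBand63]; norm_num; omega
  · rw [show ((1:Int) <<< (6:Nat)) - 1 = 63 from by rw [Int.shiftLeft_eq]; ring, pvBand63, pvBand63, pvE3]
    omega

-- value of both programs on a 3-byte chunk, as plain %-arithmetic
def pvChunk : List Int → List Int
  | a :: b :: c :: t => pvE0 a :: pvE1 a b :: pvE2 b c :: pvE3 c :: pvChunk t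
  | [a, b] => [pvE0 a, pvE1 a b]
  | [a] => [pvE0 a]
  | [] => []

lemma pvBChunk : ∀ (L vals : List Int), (List.foldl pvStep (vals, 0, 0) L).1 = vals ++ pvChunk L
  | [], vals => by simp [pvChunk]
  | [a], vals => by simp [List.foldl, pvStep1, pvChunk]
  | [a, b], vals => by
      simp only [List.foldl, pvStep1]
      rw [pvStep2 _ _ _ (by omega) (by omega)]
      simp [pvChunk, pvE1]
  | a :: b :: c :: t, vals => by
      simp only [List.foldl, pvStep1]
      rw [pvStep2 _ _ _ (by omega) (by omega), pvStep3 _ _ _ (by omega) (by omega)]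
      rw [pvBChunk t _]
      simp [pvChunk, pvE1, pvE2]

lemma pvGetDCons3 (x y z : Int) (xs : List Int) (j : Int) (hj : 0 ≤ j) (d : Int) :
    PySem.List.pyGetD (x :: y :: z :: xs) (j + 3) d = PySem.List.pyGetD xs j d := by
  obtain ⟨n, rfl⟩ := Int.eq_ofNat_of_zero_le hj
  rw [show ((n : Int) + 3) = ((n + 3 : Nat) : Int) from by push_cast; ring]
  rw [PySem.List.pyGetD_natCast, PySem.List.pyGetD_natCast]
  simp

lemma pvAmap (bytes : List Int) :
    cast_8_bit_to_6_bit bytes =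
      (PySem.List.pyRange 0 (PySem.Int.floordiv ((bytes.length : Int) * 8) 6) 1).map (pvAvalue bytes) := by
  rw [cast_8_bit_to_6_bit, PySem.List.foldl_append_singleton_eq_map]
  simp

lemma pvAval0 (a : Int) (rest : List Int) : pvAvalue (a :: rest) 0 = pvE0 a := by
  simp only [pvAvalue]
  norm_num [PySem.Int.mod_eq_emod_of_pos, PySem.Int.floordiv_eq_ediv_of_pos]
  exact pvA0 a

lemma pvAval1 (a b : Int) (rest : List Int) : pvAvalue (a :: b :: rest) 1 = pvE1 a b := by
  simp only [pvAvalue]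
  norm_num [PySem.Int.mod_eq_emod_of_pos, PySem.Int.floordiv_eq_ediv_of_pos]
  simp only [PySem.List.pyGetD_ofNat', List.getD_cons_succ, List.getD_cons_zero]
  exact pvA1 a b

lemma pvAval2 (a b c : Int) (rest : List Int) : pvAvalue (a :: b :: c :: rest) 2 = pvE2 b c := by
  simp only [pvAvalue]
  norm_num [PySem.Int.mod_eq_emod_of_pos, PySem.Int.floordiv_eq_ediv_of_pos]
  simp only [PySem.List.pyGetD_ofNat', List.getD_cons_succ, List.getD_cons_zero]
  exact pvA2 b c

lemma pvAval3 (a b c : Int) (rest : List Int) : pvAvalue (a :: b :: c :: rest) 3 = pvE3 c := by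
  simp only [pvAvalue]
  norm_num [PySem.Int.mod_eq_emod_of_pos, PySem.Int.floordiv_eq_ediv_of_pos]
  simp only [PySem.List.pyGetD_ofNat', List.getD_cons_succ, List.getD_cons_zero]
  exact pvA3 c

lemma pvAshift (a b c : Int) (t : List Int) (k : Nat) :
    pvAvalue (a :: b :: c :: t) (4 + (k : Int)) = pvAvalue t (k : Int) := by
  simp only [pvAvalue]
  have hmod : PySem.Int.mod (4 + (k : Int)) 4 = PySem.Int.mod (k : Int) 4 := by
    rw [PySem.Int.mod_eq_emod_of_pos (by norm_num), PySem.Int.mod_eq_emod_of_pos (by norm_num)]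
    omega
  have hbi : PySem.Int.floordiv ((4 + (k : Int)) * 6) 8 = PySem.Int.floordiv ((k : Int) * 6) 8 + 3 := by
    rw [PySem.Int.floordiv_eq_ediv_of_pos (by norm_num), PySem.Int.floordiv_eq_ediv_of_pos (by norm_num)]
    omega
  have hnn : 0 ≤ PySem.Int.floordiv ((k : Int) * 6) 8 := by
    rw [PySem.Int.floordiv_eq_ediv_of_pos (by norm_num)]
    omega
  rw [hmod, hbi]
  rw [show PySem.Int.floordiv ((k : Int) * 6) 8 + 3 + 1 = (PySem.Int.floordiv ((k : Int) * 6) 8 + 1) + 3 from by ring]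
  rw [pvGetDCons3 a b c t _ hnn, pvGetDCons3 a b c t _ (by omega)]

lemma pvAtail (a b c : Int) (t : List Int) (M : Int) :
    (PySem.List.pyRange 4 (M + 4) 1).map (pvAvalue (a :: b :: c :: t)) =
      (PySem.List.pyRange 0 M 1).map (pvAvalue t) := by
  rw [PySem.List.pyRange_one 4 (M + 4), PySem.List.pyRange_one 0 M]
  simp only [List.map_map]
  rw [show M + 4 - 4 = M - 0 from by ring]
  apply List.map_congr_left
  intro n _
  simp only [Function.comp_apply]
  rw [show (0 : Int) + (n : Int) = (n : Int) from by ring]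
  exact pvAshift a b c t n

lemma pvMlen (t : List Int) (a b c : Int) :
    PySem.Int.floordiv (((a :: b :: c :: t).length : Int) * 8) 6 =
      PySem.Int.floordiv ((t.length : Int) * 8) 6 + 4 := by
  rw [PySem.Int.floordiv_eq_ediv_of_pos (by norm_num), PySem.Int.floordiv_eq_ediv_of_pos (by norm_num)]
  simp only [List.length_cons]
  push_cast
  omega

lemma pvMnn (t : List Int) : 0 ≤ PySem.Int.floordiv ((t.length : Int) * 8) 6 := by
  rw [PySem.Int.floordiv_eq_ediv_of_pos (by norm_num)]
  omega

lemma pvAChunk : ∀ (L : List Int), cast_8_bit_to_6_bit L = pvChunk L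
  | [] => by rfl
  | [a] => by
      rw [pvAmap]
      norm_num [PySem.Int.floordiv_eq_ediv_of_pos]
      rw [show PySem.List.pyRange 0 1 1 = [0] from by decide]
      simp [pvChunk, pvAval0]
  | [a, b] => by
      rw [pvAmap]
      norm_num [PySem.Int.floordiv_eq_ediv_of_pos]
      rw [show PySem.List.pyRange 0 2 1 = [0, 1] from by decide]
      simp [pvChunk, pvAval0, pvAval1]
  | a :: b :: c :: t => by
      rw [pvAmap, pvMlen]
      rw [PySem.List.pyRange_one_append 0 4 _ (by norm_num) (by have := pvMnn t; omega)]
      rw [List.map_append]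
      rw [show PySem.List.pyRange 0 4 1 = [0, 1, 2, 3] from by decide]
      rw [pvAtail a b c t _]
      rw [← pvAmap, pvAChunk t]
      simp [pvChunk, pvAval0, pvAval1, pvAval2, pvAval3]

-- ===== VERDICT (by name: the statement is the Claim_ definition above) =====
theorem cast_8_bit_to_6_bit_spec : Claim_equal_cast_8_bit_to_6_bit := by
  intro bytes _
  unfold Spec_cast_8_bit_to_6_bit
  rw [pvAChunk, cast_8_bit_to_6_bit_alt, pvBChunk bytes []]
  simp
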